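-- pv_equiv track=rewrite | github.com/anuj2001310/Leetcode- | 3804-number-of-centered-subarrays/3804-number-of-centered-subarrays.py | centeredSubarrays
-- ===== SOURCE A (Python) =====
-- def centeredSubarrays(nums):
--     """
--     :type nums: List[int]
--     :rtype: int
--     """
--     n = len(nums)
--     ans = 0
--     for i in range(n):
--         s = set()
--         sm = 0
--         for j in range(i, n):
--             sm += nums[j]
--             s.add(nums[j])
--
--             if sm in s:
--                 ans += 1
--
--     return ans
-- ===== SOURCE B (Python) =====
-- def centeredSubarrays(nums):
--     n = len(nums)
--     ans = 0
--     for i in range(n):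
--         for j in range(i, n):
--             sub = nums[i:j+1]
--             if sum(sub) in sub:
--                 ans += 1
--     return ans
-- ===== Notes on version B (the rewrite author's own statement) =====
-- stated objective: idiomatic
-- what changed: Replaces A's incrementally maintained running sum and growing membership set with a per-subarray slice, recomputing sum(sub) and testing list membership directly.
import Mathlib
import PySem

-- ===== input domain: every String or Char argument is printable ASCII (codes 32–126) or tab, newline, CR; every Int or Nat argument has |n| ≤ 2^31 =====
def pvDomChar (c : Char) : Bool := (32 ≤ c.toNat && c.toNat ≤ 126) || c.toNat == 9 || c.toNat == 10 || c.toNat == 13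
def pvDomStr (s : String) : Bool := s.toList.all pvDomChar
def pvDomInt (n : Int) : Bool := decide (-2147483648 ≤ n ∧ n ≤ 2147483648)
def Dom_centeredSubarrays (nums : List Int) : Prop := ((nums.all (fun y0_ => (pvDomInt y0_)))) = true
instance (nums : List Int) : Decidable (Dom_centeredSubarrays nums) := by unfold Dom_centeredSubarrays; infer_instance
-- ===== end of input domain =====

-- B replaces A's incrementally maintained running sum and membership set with a
-- per-subarray slice, recomputing the sum and testing list membership directly
-- (idiomatic; not faster).

-- ===== PORT A =====
-- inner loop body: state is (s, sm, ans); nums[j] is always in range here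
def centeredSubarrays (nums : List Int) : Int :=
  let n : Int := nums.length
  (PySem.List.pyRange 0 n 1).foldl (fun ans i =>
    ((PySem.List.pyRange i n 1).foldl
      (fun (st : PySem.Set Int × Int × Int) j =>
        let x := PySem.List.pyGetD nums j 0
        let sm := st.2.1 + x
        let s := PySem.Set.add st.1 x
        if sm ∈ s then (s, sm, st.2.2 + 1) else (s, sm, st.2.2))
      (PySem.Set.empty, 0, ans)).2.2) 0

-- ===== PORT B =====
def centeredSubarrays_alt (nums : List Int) : Int :=
  let n : Int := nums.length
  (PySem.List.pyRange 0 n 1).foldl (fun ans i =>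
    (PySem.List.pyRange i n 1).foldl (fun ans j =>
      let sub := PySem.List.slice nums (some i) (some (j + 1))
      if sub.sum ∈ sub then ans + 1 else ans) ans) 0

-- ===== PRECONDITION & SPEC =====
def Spec_centeredSubarrays (nums : List Int) (out : Int) : Prop := out = centeredSubarrays_alt nums
instance (nums : List Int) (out : Int) : Decidable (Spec_centeredSubarrays nums out) := by unfold Spec_centeredSubarrays; infer_instance

-- ===== CLAIM (what is proved, stated in full; the proofs are below) =====
def Claim_equal_centeredSubarrays : Prop := ∀ (nums : List Int), Dom_centeredSubarrays nums → Spec_centeredSubarrays nums (centeredSubarrays nums)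

-- ===== LEMMAS AND PROOFS =====

-- slice nums i (j+1) extends slice nums i j by nums[j]
lemma slice_succ (nums : List Int) (i j : Int) (hi : 0 ≤ i) (hij : i ≤ j)
    (hj : j < (nums.length : Int)) :
    PySem.List.slice nums (some i) (some (j + 1))
      = PySem.List.slice nums (some i) (some j) ++ [nums[j.toNat]'(by omega)] := by
  rw [PySem.List.slice_toNat _ hi (by omega), PySem.List.slice_toNat _ hi (by omega)]
  have h1 : (j + 1).toNat = j.toNat + 1 := by omega
  have h2 : j.toNat + 1 - i.toNat = (j.toNat - i.toNat) + 1 := by omega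
  rw [h1, h2, List.take_add_one]
  have h3 : (nums.drop i.toNat)[j.toNat - i.toNat]? = some (nums[j.toNat]'(by omega)) := by
    rw [List.getElem?_drop]
    have : i.toNat + (j.toNat - i.toNat) = j.toNat := by omega
    rw [this, List.getElem?_eq_getElem (by omega)]
  rw [h3]; rfl

lemma ofList_append_singleton {α : Type} [BEq α] (l : List α) (x : α) :
    PySem.Set.ofList (l ++ [x]) = PySem.Set.add (PySem.Set.ofList l) x := by
  simp [PySem.Set.ofList_eq_foldl, List.foldl_append]

-- inner-loop invariant: A's state over range(j, n) started from the slice nums[i:j]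
lemma inner_eq (nums : List Int) (i : Int) (hi : 0 ≤ i) :
    ∀ (k : Nat) (j ans : Int), i ≤ j → j ≤ (nums.length : Int) →
    k = ((nums.length : Int) - j).toNat →
    ((PySem.List.pyRange j (nums.length : Int) 1).foldl
      (fun (st : PySem.Set Int × Int × Int) j =>
        let x := PySem.List.pyGetD nums j 0
        let sm := st.2.1 + x
        let s := PySem.Set.add st.1 x
        if sm ∈ s then (s, sm, st.2.2 + 1) else (s, sm, st.2.2))
      (PySem.Set.ofList (PySem.List.slice nums (some i) (some j)),
        (PySem.List.slice nums (some i) (some j)).sum, ans)).2.2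
    = (PySem.List.pyRange j (nums.length : Int) 1).foldl (fun ans j =>
        let sub := PySem.List.slice nums (some i) (some (j + 1))
        if sub.sum ∈ sub then ans + 1 else ans) ans := by
  intro k
  induction k with
  | zero =>
    intro j ans hij hj hk
    have : (nums.length : Int) ≤ j := by omega
    rw [PySem.List.pyRange_one_eq_nil this]
    simp [List.foldl]
  | succ k ih =>
    intro j ans hij hj hk
    have hjn : j < (nums.length : Int) := by omega
    rw [PySem.List.pyRange_one_cons hjn]
    simp only [List.foldl]
    have hget : PySem.List.pyGetD nums j 0 = nums[j.toNat]'(by omega) :=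
      PySem.List.pyGetD_eq_getElem nums 0 (by omega) hjn
    have hsl := slice_succ nums i j hi hij hjn
    set x := nums[j.toNat]'(by omega) with hx
    set sub := PySem.List.slice nums (some i) (some j) with hsub
    have hmem : ((sub.sum + x) ∈ PySem.Set.add (PySem.Set.ofList sub) x)
        ↔ ((sub ++ [x]).sum ∈ sub ++ [x]) := by
      rw [← ofList_append_singleton, PySem.Set.mem_ofList]
      simp
    by_cases hc : (sub ++ [x]).sum ∈ sub ++ [x]
    · have hc' : (sub.sum + x) ∈ PySem.Set.add (PySem.Set.ofList sub) x := hmem.mpr hc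
      rw [hget, if_pos hc', hsl, if_pos hc]
      have := ih (j + 1) (ans + 1) (by omega) (by omega) (by omega)
      rw [hsl] at this
      simpa [ofList_append_singleton] using this
    · have hc' : ¬ (sub.sum + x) ∈ PySem.Set.add (PySem.Set.ofList sub) x := fun h => hc (hmem.mp h)
      rw [hget, if_neg hc', hsl, if_neg hc]
      have := ih (j + 1) ans (by omega) (by omega) (by omega)
      rw [hsl] at this
      simpa [ofList_append_singleton] using this

lemma slice_self_nil (nums : List Int) (i : Int) (hi : 0 ≤ i) :
    PySem.List.slice nums (some i) (some i) = [] := by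
  rw [PySem.List.slice_toNat _ hi hi]; simp

lemma outer_body_eq (nums : List Int) (i ans : Int) (hi : 0 ≤ i) :
    ((PySem.List.pyRange i (nums.length : Int) 1).foldl
      (fun (st : PySem.Set Int × Int × Int) j =>
        let x := PySem.List.pyGetD nums j 0
        let sm := st.2.1 + x
        let s := PySem.Set.add st.1 x
        if sm ∈ s then (s, sm, st.2.2 + 1) else (s, sm, st.2.2))
      (PySem.Set.empty, 0, ans)).2.2
    = (PySem.List.pyRange i (nums.length : Int) 1).foldl (fun ans j =>
        let sub := PySem.List.slice nums (some i) (some (j + 1))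
        if sub.sum ∈ sub then ans + 1 else ans) ans := by
  by_cases h : i ≤ (nums.length : Int)
  · have := inner_eq nums i hi ((nums.length : Int) - i).toNat i ans le_rfl h rfl
    rw [slice_self_nil nums i hi] at this
    simpa [PySem.Set.empty, PySem.Set.ofList] using this
  · rw [PySem.List.pyRange_one_eq_nil (show (nums.length : Int) ≤ i by omega)]
    simp [List.foldl]

-- ===== VERDICT (by name: the statement is the Claim_ definition above) =====
theorem centeredSubarrays_spec : Claim_equal_centeredSubarrays := by
  intro nums _
  unfold Spec_centeredSubarrays centeredSubarrays centeredSubarrays_alt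
  apply PySem.List.foldl_congr_mem
  intro ans i hi
  exact outer_body_eq nums i ans (PySem.List.mem_pyRange_one.mp hi).1
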